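-- pv_equiv track=rewrite | github.com/tfeltin/wedge | wedge-orchestrator/placement/placement.py | is_single_threaded
-- ===== SOURCE A (Python) =====
-- def is_single_threaded(solution):
--     if len(solution) < 2:
--         return True
--     seen = [solution[0]]
--     for i in range(1, len(solution)):
--         if solution[i] not in seen:
--             seen.append(solution[i])
--         else:
--             if solution[i] != solution[i-1]:
--                 return False
--     return True
-- ===== SOURCE B (Python) =====
-- def is_single_threaded(solution):
--     runs = []
--     for x in solution:
--         if not runs or runs[-1] != x:
--             runs.append(x)
--     return len(set(runs)) == len(runs)
-- ===== Notes on version B (the rewrite author's own statement) =====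
-- stated objective: faster
-- what changed: B compresses the list into consecutive-run representatives in one pass and then checks that list for duplicates with a set, replacing A's growing-list membership scan with early exit.
import Mathlib
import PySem

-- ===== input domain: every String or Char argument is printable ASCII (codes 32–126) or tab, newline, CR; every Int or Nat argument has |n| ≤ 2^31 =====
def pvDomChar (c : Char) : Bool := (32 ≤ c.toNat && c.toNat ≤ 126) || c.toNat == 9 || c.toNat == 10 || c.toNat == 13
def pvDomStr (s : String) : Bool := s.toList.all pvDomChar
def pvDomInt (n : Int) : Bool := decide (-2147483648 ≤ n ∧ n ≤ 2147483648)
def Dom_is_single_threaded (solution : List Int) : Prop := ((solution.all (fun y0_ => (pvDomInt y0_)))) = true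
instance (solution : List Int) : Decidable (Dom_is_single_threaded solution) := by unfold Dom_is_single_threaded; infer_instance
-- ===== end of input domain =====

-- B replaces A's seen-membership pass (early exit) by compressing the list into
-- consecutive-run representatives and checking that run list for duplicates.

-- ===== PORT A =====
-- A's for-loop over i in range(1, len): state is `seen`; solution[i-1] is carried as `prev`.
def isSTGo (seen : List Int) (prev : Int) : List Int → Bool
  | [] => true
  | x :: xs =>
    if !(seen.contains x) then isSTGo (seen ++ [x]) x xs
    else if x != prev then false
    else isSTGo seen x xs

def is_single_threaded (solution : List Int) : Bool :=
  if solution.length < 2 then true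
  else
    match solution with
    | [] => true            -- unreachable: length ≥ 2
    | h :: t => isSTGo [h] h t

-- ===== PORT B =====
-- B's run-compression loop: append x only when runs is empty or runs[-1] != x.
def runsGo (runs : List Int) : List Int → List Int
  | [] => runs
  | x :: xs =>
    if runs.isEmpty || runs.getLast? != some x then runsGo (runs ++ [x]) xs
    else runsGo runs xs

def is_single_threaded_alt (solution : List Int) : Bool :=
  let runs := runsGo [] solution
  (PySem.Set.ofList runs).length == runs.length

-- ===== PRECONDITION & SPEC =====
def Spec_is_single_threaded (solution : List Int) (out : Bool) : Prop := out = is_single_threaded_alt solution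
instance (solution : List Int) (out : Bool) : Decidable (Spec_is_single_threaded solution out) := by unfold Spec_is_single_threaded; infer_instance

-- ===== CLAIM (what is proved, stated in full; the proofs are below) =====
def Claim_equal_is_single_threaded : Prop := ∀ (solution : List Int), Dom_is_single_threaded solution → Spec_is_single_threaded solution (is_single_threaded solution)

-- ===== LEMMAS AND PROOFS =====

-- `foldl Set.add` (hence Set.ofList) yields a sublist of s ++ xs extending s.
lemma foldl_add_sublist (xs : List Int) : ∀ (s : List Int),
    ∃ t, xs.foldl PySem.Set.add s = s ++ t ∧ t.Sublist xs := by
  induction xs with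
  | nil => intro s; exact ⟨[], by simp⟩
  | cons x xs ih =>
    intro s
    simp only [List.foldl_cons]
    by_cases h : x ∈ s
    · obtain ⟨t, ht, hs⟩ := ih s
      refine ⟨t, ?_, hs.cons x⟩
      simpa [PySem.Set.add, h] using ht
    · obtain ⟨t, ht, hs⟩ := ih (s ++ [x])
      refine ⟨x :: t, ?_, hs.cons₂ x⟩
      simp only [PySem.Set.add]
      simpa [h] using ht

-- len(set(rs)) == len(rs) succeeds exactly when rs has no duplicates.
lemma check_eq_nodup (rs : List Int) :
    ((PySem.Set.ofList rs).length == rs.length) = decide rs.Nodup := by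
  by_cases h : rs.Nodup
  · simp [PySem.Set.ofList_eq_self_of_nodup rs h, h]
  · simp only [h, decide_false, beq_eq_false_iff_ne]
    intro hlen
    obtain ⟨t, ht, hs⟩ := foldl_add_sublist rs []
    have hof : PySem.Set.ofList rs = t := by
      simpa using (PySem.Set.ofList_eq_foldl rs ▸ ht)
    have : t = rs := hs.eq_of_length (by rw [← hof]; exact hlen)
    exact h (this ▸ hof ▸ PySem.Set.nodup_ofList rs)

-- runsGo only appends to its accumulator.
lemma runsGo_prefix (xs : List Int) : ∀ (r : List Int), ∃ s, runsGo r xs = r ++ s := by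
  induction xs with
  | nil => intro r; exact ⟨[], by simp [runsGo]⟩
  | cons x xs ih =>
    intro r
    by_cases h : r.isEmpty || r.getLast? != some x
    · obtain ⟨s, hs⟩ := ih (r ++ [x])
      exact ⟨x :: s, by simp [runsGo, h, hs]⟩
    · obtain ⟨s, hs⟩ := ih r
      exact ⟨s, by simp [runsGo, h, hs]⟩

-- Loop invariant: A's `seen` equals B's duplicate-free run list, whose last element is prev.
lemma key (xs : List Int) : ∀ (runs : List Int) (prev : Int), runs ≠ [] → runs.Nodup →
    runs.getLast? = some prev →
    isSTGo runs prev xs = ((PySem.Set.ofList (runsGo runs xs)).length == (runsGo runs xs).length) := by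
  induction xs with
  | nil =>
    intro runs prev hne hnd _
    simp [isSTGo, runsGo, check_eq_nodup, hnd]
  | cons x xs ih =>
    intro runs prev hne hnd hlast
    have hprev_mem : prev ∈ runs := List.mem_of_getLast? hlast
    have hempty : runs.isEmpty = false := by simp [hne]
    by_cases hmem : x ∈ runs
    · by_cases hxp : x = prev
      · -- adjacent repeat: both sides keep their state
        subst hxp
        have hB : runsGo runs (x :: xs) = runsGo runs xs := by
          simp [runsGo, hempty, hlast]
        rw [hB, ← ih runs x hne hnd hlast]
        simp [isSTGo, hmem]
      · -- value seen in an earlier run: A returns False, B's run list gets a duplicate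
        have hA : isSTGo runs prev (x :: xs) = false := by
          simp [isSTGo, hmem, hxp]
        have hB : runsGo runs (x :: xs) = runsGo (runs ++ [x]) xs := by
          have : runs.getLast? ≠ some x := by rw [hlast]; simp [Ne.symm hxp]
          simp [runsGo, hempty, this]
        obtain ⟨s, hs⟩ := runsGo_prefix xs (runs ++ [x])
        have hnotnd : ¬ (runsGo runs (x :: xs)).Nodup := by
          rw [hB, hs]
          intro hnd'
          have h1 : [x].Sublist runs := List.singleton_sublist.mpr hmem
          have h2 : List.Sublist ([x] ++ [x]) ((runs ++ [x]) ++ s) :=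
            (h1.append (List.Sublist.refl [x])).trans (List.sublist_append_left _ _)
          have := hnd'.sublist h2
          simp at this
        rw [hA, check_eq_nodup]
        simp [hnotnd]
    · -- new value: both sides append x
      have hxp : x ≠ prev := fun h => hmem (h ▸ hprev_mem)
      have hA : isSTGo runs prev (x :: xs) = isSTGo (runs ++ [x]) x xs := by
        simp [isSTGo, hmem]
      have hB : runsGo runs (x :: xs) = runsGo (runs ++ [x]) xs := by
        have : runs.getLast? ≠ some x := by rw [hlast]; simp [Ne.symm hxp]
        simp [runsGo, hempty, this]
      rw [hA, hB]
      exact ih (runs ++ [x]) x (by simp)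
        (by simp [List.nodup_append, hnd]; exact fun a ha h => hmem (h ▸ ha))
        (by simp)

-- ===== VERDICT (by name: the statement is the Claim_ definition above) =====
theorem is_single_threaded_spec : Claim_equal_is_single_threaded := by
  intro solution _
  unfold Spec_is_single_threaded is_single_threaded is_single_threaded_alt
  match solution with
  | [] => simp [runsGo]
  | [h] => simp [runsGo, PySem.Set.ofList]
  | h :: h2 :: t =>
    have hlen : ¬ (h :: h2 :: t).length < 2 := by simp
    simp only [hlen, if_false]
    have hB : runsGo [] (h :: h2 :: t) = runsGo [h] (h2 :: t) := by
      simp [runsGo]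
    rw [hB]
    exact key (h2 :: t) [h] h (by simp) (by simp) (by simp)
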